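-- pv_equiv track=rewrite | github.com/imseongwoo/Algorithm | 코드카타/부족한 금액 계산하기.py | solution
-- ===== SOURCE A (Python) =====
-- def solution(price, money, count):
--     answer = 0
--     temp = price
--     for i in range(count):
--         answer += price
--         price += temp
--
--     if answer < money:
--         return 0
--     else:
--         answer = answer - money
--     return answer
-- ===== SOURCE B (Python) =====
-- def solution(price, money, count):
--     # closed form: total progressive price = price * (1+2+...+count)
--     n = count if count > 0 else 0
--     total = price * n * (n + 1) // 2
--     return 0 if total < money else total - money
-- ===== Notes on version B (the rewrite author's own statement) =====
-- stated objective: faster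
-- what changed: Replaced the O(count) accumulation loop with the closed-form arithmetic-series formula price*n*(n+1)//2.
import Mathlib
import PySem

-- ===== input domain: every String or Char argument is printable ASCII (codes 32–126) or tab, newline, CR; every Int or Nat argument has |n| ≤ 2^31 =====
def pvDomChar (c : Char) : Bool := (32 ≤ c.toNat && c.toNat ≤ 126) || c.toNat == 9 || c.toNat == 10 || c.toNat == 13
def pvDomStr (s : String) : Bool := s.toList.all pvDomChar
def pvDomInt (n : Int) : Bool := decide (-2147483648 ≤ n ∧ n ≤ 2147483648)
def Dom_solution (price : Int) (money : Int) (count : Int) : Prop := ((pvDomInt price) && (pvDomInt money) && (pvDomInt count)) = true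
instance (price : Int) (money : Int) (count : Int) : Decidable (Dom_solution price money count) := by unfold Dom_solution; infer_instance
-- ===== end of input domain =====

-- B replaces A's O(count) loop by the closed-form arithmetic series price*n*(n+1)//2 (objective: faster).

-- ===== PORT A =====
def solution (price : Int) (money : Int) (count : Int) : Int :=
  -- answer = 0; temp = price; for i in range(count): answer += price; price += temp
  let temp := price
  let s := (PySem.List.pyRange 0 count 1).foldl
      (fun (st : Int × Int) _ => (st.1 + st.2, st.2 + temp)) (0, price)
  let answer := s.1
  if answer < money then 0 else answer - money

-- ===== PORT B =====
def solution_alt (price : Int) (money : Int) (count : Int) : Int :=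
  let n := if count > 0 then count else 0
  let total := PySem.Int.floordiv (price * n * (n + 1)) 2
  if total < money then 0 else total - money

-- ===== PRECONDITION & SPEC =====
def Spec_solution (price : Int) (money : Int) (count : Int) (out : Int) : Prop := out = solution_alt price money count
instance (price : Int) (money : Int) (count : Int) (out : Int) : Decidable (Spec_solution price money count out) := by unfold Spec_solution; infer_instance

-- ===== CLAIM (what is proved, stated in full; the proofs are below) =====
def Claim_equal_solution : Prop := ∀ (price : Int) (money : Int) (count : Int), Dom_solution price money count → Spec_solution price money count (solution price money count)

-- ===== LEMMAS AND PROOFS =====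

-- closed form of A's loop: after k iterations the pair is (answer, running price) with
-- 2*answer = p*k*(k+1) and running price = p*(k+1)
theorem pvLoopA (p : Int) (k : Nat) :
    2 * ((List.range k).foldl (fun (st : Int × Int) _ => (st.1 + st.2, st.2 + p)) (0, p)).1
      = p * k * (k + 1)
    ∧ ((List.range k).foldl (fun (st : Int × Int) _ => (st.1 + st.2, st.2 + p)) (0, p)).2
      = p * (k + 1) := by
  induction k with
  | zero => simp
  | succ k ih =>
    rw [List.range_succ, List.foldl_append]
    obtain ⟨h1, h2⟩ := ih
    constructor
    · simp only [List.foldl_cons, List.foldl_nil]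
      push_cast
      rw [mul_add, h1, h2]
      ring
    · simp only [List.foldl_cons, List.foldl_nil]
      push_cast
      rw [h2]
      ring

-- foldl of a constant-step function over pyRange only depends on the length
theorem pvFoldIgnore {α β : Type} (f : β → β) (init : β) (l : List α) :
    l.foldl (fun st _ => f st) init = (List.range l.length).foldl (fun st _ => f st) init := by
  induction l generalizing init with
  | nil => simp
  | cons x xs ih =>
    simp only [List.foldl_cons, List.length_cons]
    rw [ih]
    rw [List.range_succ_eq_map]
    simp [List.foldl_map]

-- ===== VERDICT (by name: the statement is the Claim_ definition above) =====
theorem solution_spec : Claim_equal_solution := by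
  intro price money count _
  unfold Spec_solution solution solution_alt
  set k := count.toNat with hk
  have hlen : (PySem.List.pyRange 0 count 1).length = k := by
    rw [PySem.List.length_pyRange_one]; omega
  have hfold := pvFoldIgnore (fun (st : Int × Int) => (st.1 + st.2, st.2 + price)) (0, price)
      (PySem.List.pyRange 0 count 1)
  rw [hlen] at hfold
  obtain ⟨h1, _⟩ := pvLoopA price k
  have hn : (if count > 0 then count else 0) = (k : Int) := by
    split_ifs with h <;> omega
  simp only [hfold, hn]
  have htot : price * (k : Int) * ((k : Int) + 1)
      = 2 * ((List.range k).foldl (fun (st : Int × Int) _ => (st.1 + st.2, st.2 + price)) (0, price)).1 := h1.symm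
  rw [htot]
  have hfd : PySem.Int.floordiv (2 * ((List.range k).foldl (fun (st : Int × Int) _ => (st.1 + st.2, st.2 + price)) (0, price)).1) 2
      = ((List.range k).foldl (fun (st : Int × Int) _ => (st.1 + st.2, st.2 + price)) (0, price)).1 := by
    rw [PySem.Int.floordiv_eq_ediv_of_pos (by norm_num)]
    omega
  rw [hfd]
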